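-- pv_equiv track=rewrite | github.com/Fourberie/DNK | DNK.py | get_total_time
-- ===== SOURCE A (Python) =====
-- def get_total_time(heroes, n):
--     res = 0
--     if n == 1:
--         res = sum(heroes)
--     else:
--         h = heroes[0:n]
--         heroes = heroes[n:len(heroes)]
--         while len(heroes) > 0:
--             m = min(h)
--             m_it = h.index(m)
--             h[m_it] += heroes[0]
--             del heroes[0]
--
--
--         res = max(h)
--
--     return res
-- ===== SOURCE B (Python) =====
-- def _insert_sorted(lst, v):
--     # insert v into ascending lst, before the first element >= v
--     out = []
--     i = 0
--     while i < len(lst) and lst[i] < v: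
--         out.append(lst[i])
--         i += 1
--     return out + [v] + lst[i:]
--
--
-- def get_total_time(heroes, n):
--     if n == 1:
--         return sum(heroes)
--     s = sorted(heroes[0:n])
--     for x in heroes[n:len(heroes)]:
--         s = _insert_sorted(s[1:], s[0] + x)
--     return s[-1]
-- ===== Notes on version B (the rewrite author's own statement) =====
-- stated objective: alternative
-- what changed: B keeps the worker loads as an ascending sorted list (sorted once up front; each job pops the minimum at the head and re-inserts the increased load in order), instead of rescanning the unsorted load list with min() and index() for every job; the final answer is the last element instead of max().
import Mathlib
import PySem

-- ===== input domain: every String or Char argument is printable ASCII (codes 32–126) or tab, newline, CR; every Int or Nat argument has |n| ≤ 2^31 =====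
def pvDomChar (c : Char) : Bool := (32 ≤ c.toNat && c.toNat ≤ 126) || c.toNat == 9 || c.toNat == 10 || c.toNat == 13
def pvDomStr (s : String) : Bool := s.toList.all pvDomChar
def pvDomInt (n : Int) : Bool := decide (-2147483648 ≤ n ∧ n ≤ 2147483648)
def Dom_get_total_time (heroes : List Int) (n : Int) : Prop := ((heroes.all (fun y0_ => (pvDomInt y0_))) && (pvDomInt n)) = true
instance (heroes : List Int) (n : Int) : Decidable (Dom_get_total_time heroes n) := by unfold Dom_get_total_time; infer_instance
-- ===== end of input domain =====

-- B keeps the loads in an ascending sorted list (pop min at the head, re-insert in order)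
-- instead of A's min()+index() rescans of an unsorted list; return value only, same cost class.

-- ===== PORT A =====
-- while len(heroes) > 0: m = min(h); m_it = h.index(m); h[m_it] += heroes[0]; del heroes[0]
def aLoop (h : List Int) (rem : List Int) : List Int :=
  match rem with
  | [] => h
  | x :: rest =>
      let m := (PySem.List.min? h (fun y => y)).getD 0
      let i := (PySem.List.index? h m).getD 0
      aLoop (h.set i (h.getD i 0 + x)) rest

def get_total_time (heroes : List Int) (n : Int) : Int :=
  if n == 1 then heroes.sum
  else
    let h := PySem.List.slice heroes (some 0) (some n)
    let rem := PySem.List.slice heroes (some n) (some heroes.length)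
    let h2 := aLoop h rem
    (PySem.List.max? h2 (fun y => y)).getD 0

-- ===== PORT B =====
-- _insert_sorted: walk past elements < v, place v before the first element ≥ v
def bIns (lst : List Int) (v : Int) : List Int :=
  match lst with
  | [] => [v]
  | a :: t => if a < v then a :: bIns t v else v :: a :: t

def get_total_time_alt (heroes : List Int) (n : Int) : Int :=
  if n == 1 then heroes.sum
  else
    let s0 := PySem.List.sorted (PySem.List.slice heroes (some 0) (some n)) (fun y => y) false
    let s := (PySem.List.slice heroes (some n) (some heroes.length)).foldl
      (fun s x => bIns (PySem.List.slice s (some 1) none) ((PySem.List.pyGet? s 0).getD 0 + x)) s0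
    (PySem.List.pyGet? s (-1)).getD 0

-- ===== PRECONDITION & SPEC =====
-- Pre_ excludes exactly the inputs where A raises ValueError: n ≠ 1 and heroes[0:n] empty
-- (min()/max() of an empty list); B raises there too.
def Pre_get_total_time (heroes : List Int) (n : Int) : Prop :=
  n = 1 ∨ PySem.List.slice heroes (some 0) (some n) ≠ []
instance (heroes : List Int) (n : Int) : Decidable (Pre_get_total_time heroes n) := by
  unfold Pre_get_total_time; infer_instance

def pvWitness_get_total_time : List Int × Int := ([3, 1, 2, 4, 2], 2)

def Spec_get_total_time (heroes : List Int) (n : Int) (out : Int) : Prop := out = get_total_time_alt heroes n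
instance (heroes : List Int) (n : Int) (out : Int) : Decidable (Spec_get_total_time heroes n out) := by unfold Spec_get_total_time; infer_instance

-- ===== CLAIM (what is proved, stated in full; the proofs are below) =====
def Claim_equal_get_total_time : Prop := ∀ (heroes : List Int) (n : Int), Dom_get_total_time heroes n → Pre_get_total_time heroes n → Spec_get_total_time heroes n (get_total_time heroes n)

-- ===== LEMMAS AND PROOFS =====

theorem bIns_perm (lst : List Int) (v : Int) : (bIns lst v).Perm (v :: lst) := by
  induction lst with
  | nil => simp [bIns]
  | cons a t ih =>
      simp only [bIns]
      split
      · exact ((ih.cons a).trans (List.Perm.swap v a t)).symm.symm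
      · exact List.Perm.refl _

theorem bIns_pairwise (lst : List Int) (v : Int) (h : lst.Pairwise (· ≤ ·)) :
    (bIns lst v).Pairwise (· ≤ ·) := by
  induction lst with
  | nil => simp [bIns]
  | cons a t ih =>
      simp only [bIns]
      rcases List.pairwise_cons.mp h with ⟨ha, ht⟩
      split
      · rename_i hav
        refine List.pairwise_cons.mpr ⟨?_, ih ht⟩
        intro y hy
        rcases (List.Perm.mem_iff (bIns_perm t v)).mp hy with h1
        rcases List.mem_cons.mp h1 with rfl | hyt
        · exact le_of_lt hav
        · exact ha y hyt
      · rename_i hav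
        refine List.pairwise_cons.mpr ⟨?_, h⟩
        intro y hy
        rcases List.mem_cons.mp hy with rfl | hyt
        · omega
        · exact le_trans (by omega) (ha y hyt)

theorem set_append_mid (pre suf : List Int) (m v : Int) :
    (pre ++ m :: suf).set pre.length v = pre ++ v :: suf := by
  induction pre with
  | nil => simp
  | cons a p ih => simp [ih]

theorem last_is_max (s : List Int) (hs : s ≠ []) (hp : s.Pairwise (· ≤ ·)) :
    ∀ y ∈ s, y ≤ s.getLast hs := by
  induction s with
  | nil => exact absurd rfl hs
  | cons a t ih =>
      intro y hy
      rcases List.pairwise_cons.mp hp with ⟨ha, ht⟩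
      cases t with
      | nil => simp at hy; simp [hy]
      | cons b u =>
          rw [List.getLast_cons (by simp)]
          rcases List.mem_cons.mp hy with rfl | hyt
          · exact ha _ (List.getLast_mem _)
          · exact ih (by simp) ht y hyt

-- the two loops keep permutation-equal states; B's stays sorted
theorem loop_perm (rem : List Int) : ∀ (h s : List Int), h ≠ [] → s.Perm h → s.Pairwise (· ≤ ·) →
    (rem.foldl (fun s x => bIns (PySem.List.slice s (some 1) none) ((PySem.List.pyGet? s 0).getD 0 + x)) s).Perm
      (aLoop h rem) ∧
    (rem.foldl (fun s x => bIns (PySem.List.slice s (some 1) none) ((PySem.List.pyGet? s 0).getD 0 + x)) s).Pairwise (· ≤ ·) := by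
  induction rem with
  | nil => intro h s _ hperm hsort; exact ⟨hperm, hsort⟩
  | cons x rest ih =>
      intro h s hne hperm hsort
      obtain ⟨a, t, rfl⟩ : ∃ a t, s = a :: t := by
        cases s with
        | nil => exact absurd hperm.symm.eq_nil (by simpa using hne)
        | cons a t => exact ⟨a, t, rfl⟩
      -- A's step data
      obtain ⟨m, hm⟩ : ∃ m, PySem.List.min? h (fun y => y) = some m := by
        cases hmin : PySem.List.min? h (fun y => y) with
        | none => exact absurd (((PySem.List.min?_eq_none_iff _ _).mp hmin)) hne
        | some m => exact ⟨m, rfl⟩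
      have hmmem : m ∈ h := PySem.List.min?_mem hm
      have hmmin : ∀ y ∈ h, m ≤ y := by
        intro y hy; simpa using PySem.List.min?_isMin hm y hy
      obtain ⟨i, hi⟩ : ∃ i, PySem.List.index? h m = some i := by
        cases hidx : PySem.List.index? h m with
        | none => exact absurd hmmem (((PySem.List.index?_eq_none_iff _ _).mp hidx))
        | some i => exact ⟨i, rfl⟩
      obtain ⟨pre, suf, rfl, hlen, _⟩ := (PySem.List.index?_eq_some_iff _ _ _).mp hi
      -- head of sorted s is the min of h
      have ham : a = m := by
        have h1 : m ≤ a := hmmin a (hperm.mem_iff.mp (by simp))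
        have h2 : a ≤ m := by
          rcases List.pairwise_cons.mp hsort with ⟨ha, _⟩
          rcases List.mem_cons.mp (hperm.mem_iff.mpr hmmem) with rfl | hmt
          · rfl
          · exact ha m hmt
        omega
      -- evaluate A's update
      have hi' : List.idxOf? m (pre ++ m :: suf) = some i := by
        rw [← PySem.List.index?_eq_idxOf?]; exact hi
      have hget : (pre ++ m :: suf)[i]? = some m := by
        subst hlen; simp
      have hset : (pre ++ m :: suf).set i (m + x) = pre ++ (m + x) :: suf := by
        subst hlen; exact set_append_mid pre suf m (m + x)
      -- state permutation after one step
      have htperm : t.Perm (pre ++ suf) := by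
        have : (a :: t).Perm (m :: (pre ++ suf)) := hperm.trans List.perm_middle
        rw [ham] at this
        exact this.cons_inv
      have hstep : (bIns t (a + x)).Perm (pre ++ (m + x) :: suf) := by
        refine ((bIns_perm t (a + x)).trans ?_).trans List.perm_middle.symm
        rw [ham]
        exact htperm.cons (m + x)
      have hsort' : (bIns t (a + x)).Pairwise (· ≤ ·) :=
        bIns_pairwise t (a + x) (List.pairwise_cons.mp hsort).2
      have hne' : pre ++ (m + x) :: suf ≠ [] := by simp
      have := ih (pre ++ (m + x) :: suf) (bIns t (a + x)) hne' hstep hsort'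
      simpa [aLoop, hm, hi', hget, hset, PySem.List.slice_from_one, PySem.List.pyGet?_zero_cons] using this

theorem aLoop_ne_nil (rem : List Int) : ∀ h : List Int, h ≠ [] → aLoop h rem ≠ [] := by
  induction rem with
  | nil => intro h hne; exact hne
  | cons x rest ih =>
      intro h hne
      simp only [aLoop]
      exact ih _ (List.ne_nil_of_length_pos (by simpa using List.length_pos_of_ne_nil hne))

theorem final_eq (h s : List Int) (hne : h ≠ []) (hperm : s.Perm h) (hsort : s.Pairwise (· ≤ ·)) :
    (PySem.List.max? h (fun y => y)).getD 0 = (PySem.List.pyGet? s (-1)).getD 0 := by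
  obtain ⟨M, hM⟩ : ∃ M, PySem.List.max? h (fun y => y) = some M := by
    cases hmax : PySem.List.max? h (fun y => y) with
    | none => exact absurd (((PySem.List.max?_eq_none_iff _ _).mp hmax)) hne
    | some M => exact ⟨M, rfl⟩
  have hsne : s ≠ [] := by intro hn; subst hn; exact hne hperm.symm.eq_nil
  have hlast : PySem.List.pyGet? s (-1) = some (s.getLast hsne) := by
    rw [PySem.List.pyGet?_neg_one, List.getLast?_eq_getLast_of_ne_nil hsne]
  have h1 : M ≤ s.getLast hsne :=
    last_is_max s hsne hsort M (hperm.mem_iff.mpr (PySem.List.max?_mem hM))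
  have h2 : s.getLast hsne ≤ M := by
    simpa using PySem.List.max?_isMax hM _ (hperm.mem_iff.mp (List.getLast_mem hsne))
  rw [hM, hlast]
  simp; omega

-- ===== VERDICT (by name: the statement is the Claim_ definition above) =====
theorem get_total_time_spec : Claim_equal_get_total_time := by
  intro heroes n _ hpre
  unfold Spec_get_total_time get_total_time get_total_time_alt
  by_cases h1 : n == 1
  · simp [h1]
  · simp only [h1, Bool.false_eq_true, if_false]
    rcases hpre with rfl | hne
    · simp at h1
    · have hs0perm : (PySem.List.sorted (PySem.List.slice heroes (some 0) (some n)) (fun y => y) false).Perm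
          (PySem.List.slice heroes (some 0) (some n)) := PySem.List.sorted_perm _ _ _
      have hs0sort : (PySem.List.sorted (PySem.List.slice heroes (some 0) (some n)) (fun y => y) false).Pairwise (· ≤ ·) := by
        simpa using PySem.List.sorted_pairwise (PySem.List.slice heroes (some 0) (some n)) (fun y => y)
      obtain ⟨hp, hs⟩ := loop_perm (PySem.List.slice heroes (some n) (some heroes.length))
        (PySem.List.slice heroes (some 0) (some n)) _ hne hs0perm hs0sort
      exact final_eq _ _ (aLoop_ne_nil _ _ hne) hp hs
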